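-- pv_equiv track=rewrite | github.com/thomasvincent/gps-genealogy-agents | src/gps_agents/research/evaluator.py | _is_nickname_match
-- ===== SOURCE A (Python) =====
-- def _is_nickname_match(formal: str, informal: str) -> bool:
--     """Check if two names are nickname variants."""
--     nicknames = {
--         "william": ["bill", "billy", "will", "willy", "willie"],
--         "robert": ["bob", "bobby", "rob", "robbie"],
--         "james": ["jim", "jimmy", "jamie"],
--         "john": ["jack", "johnny"],
--         "richard": ["dick", "rick", "ricky"],
--         "michael": ["mike", "mick", "mickey"],
--         "elizabeth": ["liz", "lizzy", "beth", "betty", "eliza"],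
--         "margaret": ["maggie", "meg", "peggy", "marge"],
--         "catherine": ["kate", "katie", "cathy", "kitty"],
--         "thomas": ["tom", "tommy"],
--         "charles": ["charlie", "chuck"],
--         "edward": ["ed", "eddie", "ted", "teddy"],
--         "alexander": ["alex", "sandy"],
--         "benjamin": ["ben", "benny"],
--         "daniel": ["dan", "danny"],
--         "samuel": ["sam", "sammy"],
--         "joseph": ["joe", "joey"],
--         "patrick": ["pat", "paddy"],
--         "archer": ["archie", "arch"],  # Specific to our case!
--     }
--
--     formal_lower = formal.lower()
--     informal_lower = informal.lower()
--
--     # Check both directions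
--     if formal_lower in nicknames:
--         if informal_lower in nicknames[formal_lower]:
--             return True
--
--     for full, nicks in nicknames.items():
--         if informal_lower == full and formal_lower in nicks:
--             return True
--         if formal_lower == full and informal_lower in nicks:
--             return True
--
--     return False
-- ===== SOURCE B (Python) =====
-- # B: the nickname data as one compact text table, parsed once into a set of
-- # (formal, nickname) pairs; the match is two symmetric membership tests.
--
-- _TABLE = (
--     "william:bill,billy,will,willy,willie;"
--     "robert:bob,bobby,rob,robbie;"
--     "james:jim,jimmy,jamie;"
--     "john:jack,johnny;"
--     "richard:dick,rick,ricky;"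
--     "michael:mike,mick,mickey;"
--     "elizabeth:liz,lizzy,beth,betty,eliza;"
--     "margaret:maggie,meg,peggy,marge;"
--     "catherine:kate,katie,cathy,kitty;"
--     "thomas:tom,tommy;"
--     "charles:charlie,chuck;"
--     "edward:ed,eddie,ted,teddy;"
--     "alexander:alex,sandy;"
--     "benjamin:ben,benny;"
--     "daniel:dan,danny;"
--     "samuel:sam,sammy;"
--     "joseph:joe,joey;"
--     "patrick:pat,paddy;"
--     "archer:archie,arch"
-- )
--
--
-- def _load_pairs():
--     pairs = set()
--     for entry in _TABLE.split(";"):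
--         full, nicks = entry.split(":")
--         for nick in nicks.split(","):
--             pairs.add((full, nick))
--     return pairs
--
--
-- _PAIRS = _load_pairs()
--
--
-- def _is_nickname_match(formal: str, informal: str) -> bool:
--     """Check if two names are nickname variants."""
--     fl = formal.lower()
--     il = informal.lower()
--     return (fl, il) in _PAIRS or (il, fl) in _PAIRS
-- ===== Notes on version B (the rewrite author's own statement) =====
-- stated objective: alternative
-- what changed: B stores the nickname data as one compact text table parsed once into a set of (formal, nickname) pairs and decides the match with two symmetric pair-membership tests, replacing A's dict literal with its redundant formal-direction pre-check and linear items() scan with early returns.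
import Mathlib
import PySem

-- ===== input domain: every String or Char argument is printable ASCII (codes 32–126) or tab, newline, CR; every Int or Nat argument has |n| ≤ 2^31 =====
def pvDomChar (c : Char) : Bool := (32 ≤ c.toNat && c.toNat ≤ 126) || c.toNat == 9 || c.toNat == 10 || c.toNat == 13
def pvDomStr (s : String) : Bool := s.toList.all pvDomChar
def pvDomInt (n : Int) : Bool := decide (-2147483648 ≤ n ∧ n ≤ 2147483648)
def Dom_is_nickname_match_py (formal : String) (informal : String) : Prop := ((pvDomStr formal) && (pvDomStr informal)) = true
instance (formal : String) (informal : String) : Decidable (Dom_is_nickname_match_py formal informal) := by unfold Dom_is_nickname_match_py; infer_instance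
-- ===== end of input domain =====

-- B stores the nickname data as one compact text table parsed once into a set of
-- (formal, nickname) pairs and decides the match with two symmetric membership tests,
-- replacing A's dict pre-check plus linear scan with early returns (objective: alternative).

-- ===== PORT A =====
-- the nickname dict literal of A
def pvNicknames : List (String × List String) :=
  [("william", ["bill", "billy", "will", "willy", "willie"]),
   ("robert", ["bob", "bobby", "rob", "robbie"]),
   ("james", ["jim", "jimmy", "jamie"]),
   ("john", ["jack", "johnny"]),
   ("richard", ["dick", "rick", "ricky"]),
   ("michael", ["mike", "mick", "mickey"]),
   ("elizabeth", ["liz", "lizzy", "beth", "betty", "eliza"]),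
   ("margaret", ["maggie", "meg", "peggy", "marge"]),
   ("catherine", ["kate", "katie", "cathy", "kitty"]),
   ("thomas", ["tom", "tommy"]),
   ("charles", ["charlie", "chuck"]),
   ("edward", ["ed", "eddie", "ted", "teddy"]),
   ("alexander", ["alex", "sandy"]),
   ("benjamin", ["ben", "benny"]),
   ("daniel", ["dan", "danny"]),
   ("samuel", ["sam", "sammy"]),
   ("joseph", ["joe", "joey"]),
   ("patrick", ["pat", "paddy"]),
   ("archer", ["archie", "arch"])]

def pvNickDict : PySem.Dict String (List String) := PySem.Dict.ofList pvNicknames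

-- the 'for full, nicks in nicknames.items():' loop with its early returns
def pvLoopA (fl il : String) : List (String × List String) → Bool
  | [] => false
  | (full, nicks) :: rest =>
    if il == full && nicks.contains fl then true
    else if fl == full && nicks.contains il then true
    else pvLoopA fl il rest

def is_nickname_match_py (formal : String) (informal : String) : Bool :=
  let fl := PySem.Str.lower formal
  let il := PySem.Str.lower informal
  if pvNickDict.contains fl && ((pvNickDict.get? fl).getD []).contains il then true
  else pvLoopA fl il pvNickDict.items

-- ===== PORT B =====
-- _TABLE: one compact string literal, "formal:nick,nick,…;formal:…"
def pvTable : String :=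
  "william:bill,billy,will,willy,willie;robert:bob,bobby,rob,robbie;james:jim,jimmy,jamie;john:jack,johnny;richard:dick,rick,ricky;michael:mike,mick,mickey;elizabeth:liz,lizzy,beth,betty,eliza;margaret:maggie,meg,peggy,marge;catherine:kate,katie,cathy,kitty;thomas:tom,tommy;charles:charlie,chuck;edward:ed,eddie,ted,teddy;alexander:alex,sandy;benjamin:ben,benny;daniel:dan,danny;samuel:sam,sammy;joseph:joe,joey;patrick:pat,paddy;archer:archie,arch"

-- _load_pairs(): parse the table into a set of (formal, nickname) pairs
def pvLoadPairs : PySem.Set (String × String) :=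
  ((PySem.Str.split? pvTable ";").getD []).foldl
    (fun pairs entry =>
      match (PySem.Str.split? entry ":").getD [] with
      | [full, nicks] =>
          ((PySem.Str.split? nicks ",").getD []).foldl
            (fun pairs nick => PySem.Set.add pairs (full, nick)) pairs
      | _ => pairs  -- unreachable on the fixed table (Python's 2-way unpack never fails here)
    ) PySem.Set.empty

def pvPairsB : PySem.Set (String × String) := pvLoadPairs

def is_nickname_match_py_alt (formal : String) (informal : String) : Bool :=
  let fl := PySem.Str.lower formal
  let il := PySem.Str.lower informal
  PySem.Set.contains pvPairsB (fl, il) || PySem.Set.contains pvPairsB (il, fl)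

-- ===== PRECONDITION & SPEC =====
def Spec_is_nickname_match_py (formal : String) (informal : String) (out : Bool) : Prop := out = is_nickname_match_py_alt formal informal
instance (formal : String) (informal : String) (out : Bool) : Decidable (Spec_is_nickname_match_py formal informal out) := by unfold Spec_is_nickname_match_py; infer_instance

-- ===== CLAIM =====
def Claim_equal_is_nickname_match_py : Prop := ∀ (formal : String) (informal : String), Dom_is_nickname_match_py formal informal → Spec_is_nickname_match_py formal informal (is_nickname_match_py formal informal)

-- ===== LEMMAS AND PROOFS =====

-- "x is a nickname of y in the table"
def pvIsNick (y x : String) : Prop := ∃ p ∈ pvNicknames, y = p.1 ∧ x ∈ p.2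

lemma pvLoopA_eq_any (fl il : String) (L : List (String × List String)) :
    pvLoopA fl il L
      = L.any (fun p => (il == p.1 && p.2.contains fl) || (fl == p.1 && p.2.contains il)) := by
  induction L with
  | nil => rfl
  | cons p rest ih =>
    obtain ⟨full, nicks⟩ := p
    simp [pvLoopA, ih, Bool.or_assoc, beq_eq_decide]

set_option maxRecDepth 10000 in
lemma pvNickDict_items : pvNickDict.items = pvNicknames := by decide

set_option maxRecDepth 100000 in
set_option maxHeartbeats 4000000 in
lemma pvPairsB_eq :
    pvPairsB = pvNicknames.flatMap (fun p => p.2.map (fun n => (p.1, n))) := by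
  decide

lemma pvMemB_iff (y x : String) :
    ((y, x) ∈ pvPairsB) ↔ pvIsNick y x := by
  rw [pvPairsB_eq]
  simp only [List.mem_flatMap, List.mem_map, pvIsNick]
  constructor
  · rintro ⟨p, hp, n, hn, heq⟩
    obtain ⟨h1, h2⟩ := Prod.mk.injEq .. ▸ heq
    exact ⟨p, hp, h1.symm, h2 ▸ hn⟩
  · rintro ⟨p, hp, hy, hx⟩
    exact ⟨p, hp, x, hx, by simp [hy]⟩

lemma pvLoopA_iff (fl il : String) :
    pvLoopA fl il pvNicknames = true ↔ (pvIsNick il fl ∨ pvIsNick fl il) := by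
  rw [pvLoopA_eq_any]
  simp only [List.any_eq_true, Bool.or_eq_true, Bool.and_eq_true, beq_iff_eq,
    List.contains_iff_mem, pvIsNick]
  constructor
  · rintro ⟨p, hp, ⟨h1, h2⟩ | ⟨h1, h2⟩⟩
    · exact Or.inl ⟨p, hp, h1, h2⟩
    · exact Or.inr ⟨p, hp, h1, h2⟩
  · rintro (⟨p, hp, h1, h2⟩ | ⟨p, hp, h1, h2⟩)
    · exact ⟨p, hp, Or.inl ⟨h1, h2⟩⟩
    · exact ⟨p, hp, Or.inr ⟨h1, h2⟩⟩

-- A's redundant first block only finds pairs the loop also finds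
lemma pvFirstBlock (fl il : String)
    (h : (pvNickDict.contains fl && ((pvNickDict.get? fl).getD []).contains il) = true) :
    pvIsNick fl il := by
  obtain ⟨hc, hm⟩ := Bool.and_eq_true_iff.mp h
  have hsome : (pvNickDict.get? fl).isSome := by
    rw [← PySem.Dict.contains_eq_isSome_get?]; exact hc
  obtain ⟨nicks, hget⟩ := Option.isSome_iff_exists.mp hsome
  have hmem : (fl, nicks) ∈ pvNickDict.items := PySem.Dict.mem_items_of_get?_eq_some pvNickDict hget
  rw [pvNickDict_items] at hmem
  rw [hget] at hm
  exact ⟨(fl, nicks), hmem, rfl, List.contains_iff_mem.mp hm⟩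

lemma pvCore (fl il : String) :
    (if pvNickDict.contains fl && ((pvNickDict.get? fl).getD []).contains il then true
     else pvLoopA fl il pvNickDict.items)
      = (PySem.Set.contains pvPairsB (fl, il) || PySem.Set.contains pvPairsB (il, fl)) := by
  rw [Bool.eq_iff_iff, pvNickDict_items]
  simp only [Bool.or_eq_true, PySem.Set.contains_iff, pvMemB_iff]
  constructor
  · intro h
    have hOr : pvIsNick il fl ∨ pvIsNick fl il := by
      by_cases hb : (pvNickDict.contains fl && ((pvNickDict.get? fl).getD []).contains il) = true
      · exact Or.inr (pvFirstBlock fl il hb)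
      · rw [if_neg hb] at h; exact (pvLoopA_iff fl il).mp h
    exact hOr.symm
  · intro h
    have hOr : pvIsNick il fl ∨ pvIsNick fl il := h.symm
    by_cases hb : (pvNickDict.contains fl && ((pvNickDict.get? fl).getD []).contains il) = true
    · rw [if_pos hb]
    · rw [if_neg hb]; exact (pvLoopA_iff fl il).mpr hOr

-- ===== VERDICT =====
theorem is_nickname_match_py_spec : Claim_equal_is_nickname_match_py := by
  intro formal informal _
  unfold Spec_is_nickname_match_py is_nickname_match_py is_nickname_match_py_alt
  exact pvCore (PySem.Str.lower formal) (PySem.Str.lower informal)
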